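-- pv_equiv track=rewrite | github.com/catsoliveira/LDLforCausalInference | UDC.py | cyclic_permutations
-- ===== SOURCE A (Python) =====
-- def cyclic_permutations(lst): #returns all cyclic permutations of a list
--     perm =[lst]
--     for k in range(1, len(lst)):
--         p = lst[k:] + lst[:k]
--         if p == lst:
--             break
--         else:
--             perm.append(p)
--     return perm
-- ===== SOURCE B (Python) =====
-- def cyclic_permutations(lst):  # all distinct cyclic rotations, original first
--     if not lst:
--         return [lst]
--     perm = [lst]
--     cur = lst[1:] + lst[:1]
--     while cur != lst:
--         perm.append(cur)
--         cur = cur[1:] + cur[:1]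
--     return perm
-- ===== Notes on version B (the rewrite author's own statement) =====
-- stated objective: alternative
-- what changed: Replaces the indexed for/break loop that re-slices the original list at every k with a while loop that maintains the current rotation incrementally, rotating by one element per step until it returns to the original.
import Mathlib
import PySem

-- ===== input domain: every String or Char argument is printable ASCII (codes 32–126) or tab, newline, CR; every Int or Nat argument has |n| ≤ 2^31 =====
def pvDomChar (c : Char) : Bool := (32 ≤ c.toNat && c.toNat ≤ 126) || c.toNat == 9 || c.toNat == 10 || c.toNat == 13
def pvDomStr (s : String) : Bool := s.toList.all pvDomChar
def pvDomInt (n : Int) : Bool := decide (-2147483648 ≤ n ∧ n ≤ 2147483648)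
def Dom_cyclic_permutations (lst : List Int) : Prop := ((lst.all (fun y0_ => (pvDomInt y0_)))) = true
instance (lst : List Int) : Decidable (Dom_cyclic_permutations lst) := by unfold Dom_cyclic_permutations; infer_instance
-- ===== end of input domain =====

-- B maintains the current rotation incrementally in a while loop instead of re-slicing
-- the original list for each index k; same values, same cost class (alternative).

-- ===== PORT A =====
-- the for-loop over range(1, len lst) with break, state = accumulated perm; k + fuel = len lst
def cpA_go (lst : List Int) (k : Nat) (fuel : Nat) (perm : List (List Int)) : List (List Int) :=
  match fuel with
  | 0 => perm
  | fuel + 1 =>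
    let p := PySem.List.slice lst (some (k : Int)) none ++ PySem.List.slice lst none (some (k : Int))
    if p = lst then perm else cpA_go lst (k + 1) fuel (perm ++ [p])

def cyclic_permutations (lst : List Int) : List (List Int) :=
  cpA_go lst 1 (lst.length - 1) [lst]

-- ===== PORT B =====
-- the while loop; fuel = len lst only makes the recursion structurally total: the loop
-- always exits within len lst - 1 iterations (rotating len lst times is the identity)
def cpB_go (lst : List Int) (cur : List Int) (fuel : Nat) (perm : List (List Int)) : List (List Int) :=
  match fuel with
  | 0 => perm
  | fuel + 1 =>
    if cur = lst then perm
    else cpB_go lst (PySem.List.slice cur (some 1) none ++ PySem.List.slice cur none (some 1))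
           fuel (perm ++ [cur])

def cyclic_permutations_alt (lst : List Int) : List (List Int) :=
  if lst = [] then [lst]
  else cpB_go lst (PySem.List.slice lst (some 1) none ++ PySem.List.slice lst none (some 1))
         lst.length [lst]

-- ===== PRECONDITION & SPEC =====
def Spec_cyclic_permutations (lst : List Int) (out : List (List Int)) : Prop := out = cyclic_permutations_alt lst
instance (lst : List Int) (out : List (List Int)) : Decidable (Spec_cyclic_permutations lst out) := by unfold Spec_cyclic_permutations; infer_instance

-- ===== CLAIM (what is proved, stated in full; the proofs are below) =====
def Claim_equal_cyclic_permutations : Prop := ∀ (lst : List Int), Dom_cyclic_permutations lst → Spec_cyclic_permutations lst (cyclic_permutations lst)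

-- ===== LEMMAS AND PROOFS =====

-- rotation by k, the value both loops manipulate
def rotk (lst : List Int) (k : Nat) : List Int := lst.drop k ++ lst.take k

theorem slice_pair_eq_rotk (lst : List Int) (k : Nat) :
    PySem.List.slice lst (some (k : Int)) none ++ PySem.List.slice lst none (some (k : Int)) = rotk lst k := by
  rw [PySem.List.slice_from_natCast, PySem.List.slice_to_natCast, rotk]

theorem rotk_length (lst : List Int) : rotk lst lst.length = lst := by
  simp [rotk]

theorem slice_pair_one (xs : List Int) :
    PySem.List.slice xs (some 1) none ++ PySem.List.slice xs none (some 1) = rotk xs 1 := by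
  simpa using slice_pair_eq_rotk xs 1

theorem rotk_succ (lst : List Int) (k : Nat) (hk : k < lst.length) :
    rotk (rotk lst k) 1 = rotk lst (k + 1) := by
  unfold rotk
  have hx : lst.drop k = lst[k] :: lst.drop (k + 1) := List.drop_eq_getElem_cons hk
  have ht : lst.take (k + 1) = lst.take k ++ [lst[k]] := by
    rw [List.take_add_one, List.getElem?_eq_getElem hk]; rfl
  rw [hx, ht]
  simp only [List.cons_append, List.drop_succ_cons, List.drop_zero, List.take_succ_cons,
    List.take_zero, List.append_assoc]

-- the two loops agree whenever A's fuel runs to the end of the range and B's fuel covers it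
theorem go_agree (lst : List Int) (fuel : Nat) :
    ∀ (k fuel' : Nat) (perm : List (List Int)),
      k + fuel = lst.length → lst.length ≤ k + fuel' →
      cpA_go lst k fuel perm = cpB_go lst (rotk lst k) fuel' perm := by
  induction fuel with
  | zero =>
    intro k fuel' perm hk hf
    have hkl : k = lst.length := by omega
    subst hkl
    cases fuel' with
    | zero => rfl
    | succ f => simp [cpA_go, cpB_go, rotk_length]
  | succ fuel ih =>
    intro k fuel' perm hk hf
    have hklt : k < lst.length := by omega
    cases fuel' with
    | zero => omega
    | succ f =>
      simp only [cpA_go, cpB_go, slice_pair_eq_rotk]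
      by_cases h : rotk lst k = lst
      · simp [h]
      · simp only [if_neg h]
        rw [slice_pair_one, rotk_succ lst k hklt]
        exact ih (k + 1) f (perm ++ [rotk lst k]) (by omega) (by omega)

theorem ports_agree (lst : List Int) : cyclic_permutations lst = cyclic_permutations_alt lst := by
  unfold cyclic_permutations cyclic_permutations_alt
  by_cases h : lst = []
  · subst h; rfl
  · have hl : 0 < lst.length := List.length_pos_iff.mpr h
    rw [if_neg h, slice_pair_one]
    exact go_agree lst (lst.length - 1) 1 lst.length [lst] (by omega) (by omega)

-- ===== VERDICT (by name: the statement is the Claim_ definition above) =====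
theorem cyclic_permutations_spec : Claim_equal_cyclic_permutations := by
  intro lst _
  unfold Spec_cyclic_permutations
  exact ports_agree lst
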